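-- pv_equiv track=rewrite | github.com/meeuw/d0da | d0da/helper.py | one_is_more_decode
-- ===== SOURCE A (Python) =====
-- def one_is_more_decode(encoded):
--     """
--     Decode a byte sequence encoded with 7 bits of payload and 1 bit
--     which indicates the continuation.
--     """
--     result = []
--     current_value = 0
--     shift = 0
--
--     for byte in encoded:
--         current_value |= (
--             byte & 0x7F
--         ) << shift  # Extract the lower 7 bits and shift them into place
--         if byte & 0x80:  # If the 8th bit is set, continue to the next byte
--             shift += 7
--         else:  # If the 8th bit is not set, this is the last byte for the current value
--             result.append(current_value)
--             current_value = 0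
--             shift = 0
--
--     return result
-- ===== SOURCE B (Python) =====
-- def one_is_more_decode(encoded):
--     """
--     Two-phase decode: first partition the bytes into complete groups (each
--     ending at a byte whose continuation bit is clear; an unterminated trailing
--     run yields no group), then decode each group independently.
--     """
--     groups = []
--     current = []
--     for byte in encoded:
--         current.append(byte)
--         if not (byte & 0x80):
--             groups.append(current)
--             current = []
--     return [_decode_group(g) for g in groups]
--
--
-- def _decode_group(group):
--     value = 0
--     shift = 0
--     for b in group:
--         value |= (b & 0x7F) << shift
--         shift += 7
--     return value
-- ===== Notes on version B (the rewrite author's own statement) =====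
-- stated objective: alternative
-- what changed: Replaces A's single stateful loop (value/shift accumulators threaded across iterations with in-loop appends) by a two-phase decomposition: partition the bytes into complete continuation-terminated groups, then map an independent per-group decoder over them.
import Mathlib
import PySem

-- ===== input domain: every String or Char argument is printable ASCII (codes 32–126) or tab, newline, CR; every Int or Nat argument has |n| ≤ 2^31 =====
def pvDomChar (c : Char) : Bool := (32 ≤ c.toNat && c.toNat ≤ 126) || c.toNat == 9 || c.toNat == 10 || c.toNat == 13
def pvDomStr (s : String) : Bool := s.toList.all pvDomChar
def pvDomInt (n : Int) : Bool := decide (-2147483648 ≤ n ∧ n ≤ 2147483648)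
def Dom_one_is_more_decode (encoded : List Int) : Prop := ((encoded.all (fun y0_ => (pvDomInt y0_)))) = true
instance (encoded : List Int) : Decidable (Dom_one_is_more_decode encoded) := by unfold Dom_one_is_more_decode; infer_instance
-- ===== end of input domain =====

-- B replaces A's single stateful accumulator loop by a two-phase decomposition
-- (partition into complete groups, then map a per-group decoder); same cost.


-- ===== PORT A =====
-- A's loop step: state (result, current_value, shift)
def pvStepA (st : List Int × Int × Nat) (byte : Int) : List Int × Int × Nat :=
  let current_value := PySem.Int.bor st.2.1 (PySem.Int.band byte 0x7F <<< st.2.2)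
  if PySem.Int.band byte 0x80 ≠ 0 then (st.1, current_value, st.2.2 + 7)
  else (st.1 ++ [current_value], 0, 0)

def one_is_more_decode (encoded : List Int) : List Int :=
  (encoded.foldl pvStepA ([], 0, 0)).1

-- ===== PORT B =====
-- phase 1: partition into complete groups (current = the pending group)
def pvGroups : List Int → List Int → List (List Int)
  | [], _ => []
  | byte :: rest, current =>
    if PySem.Int.band byte 0x80 ≠ 0 then pvGroups rest (current ++ [byte])
    else (current ++ [byte]) :: pvGroups rest []

-- phase 2: decode one group (value/shift local to the group)
def pvDecodeGroup (group : List Int) : Int :=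
  (group.foldl
    (fun (vs : Int × Nat) b => (PySem.Int.bor vs.1 (PySem.Int.band b 0x7F <<< vs.2), vs.2 + 7))
    ((0 : Int), (0 : Nat))).1

def one_is_more_decode_alt (encoded : List Int) : List Int :=
  (pvGroups encoded []).map pvDecodeGroup

-- ===== PRECONDITION & SPEC =====
def Spec_one_is_more_decode (encoded : List Int) (out : List Int) : Prop := out = one_is_more_decode_alt encoded
instance (encoded : List Int) (out : List Int) : Decidable (Spec_one_is_more_decode encoded out) := by unfold Spec_one_is_more_decode; infer_instance

-- ===== CLAIM (what is proved, stated in full; the proofs are below) =====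
def Claim_equal_one_is_more_decode : Prop := ∀ (encoded : List Int), Dom_one_is_more_decode encoded → Spec_one_is_more_decode encoded (one_is_more_decode encoded)

-- ===== LEMMAS AND PROOFS =====

-- B's per-group fold state, seen as a function of the pending bytes
def pvPartial (pend : List Int) : Int × Nat :=
  pend.foldl
    (fun (vs : Int × Nat) b => (PySem.Int.bor vs.1 (PySem.Int.band b 0x7F <<< vs.2), vs.2 + 7))
    ((0 : Int), (0 : Nat))

lemma pvPartial_snoc (pend : List Int) (b : Int) :
    pvPartial (pend ++ [b]) =
      (PySem.Int.bor (pvPartial pend).1 (PySem.Int.band b 0x7F <<< (pvPartial pend).2),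
       (pvPartial pend).2 + 7) := by
  simp [pvPartial, List.foldl_append]

lemma pvDecodeGroup_eq (g : List Int) : pvDecodeGroup g = (pvPartial g).1 := rfl

-- the loop invariant: A's fold from state (res, pvPartial pend) produces
-- res followed by the decoded complete groups of the remaining bytes
lemma pv_inv : ∀ (rest : List Int) (res pend : List Int),
    (rest.foldl pvStepA (res, pvPartial pend)).1 =
      res ++ (pvGroups rest pend).map pvDecodeGroup := by
  intro rest
  induction rest with
  | nil => intro res pend; simp [pvGroups]
  | cons byte rest ih =>
    intro res pend
    by_cases h : PySem.Int.band byte 0x80 ≠ 0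
    · have hstep : pvStepA (res, pvPartial pend) byte = (res, pvPartial (pend ++ [byte])) := by
        simp [pvStepA, h, pvPartial_snoc]
      simp [List.foldl_cons, hstep, pvGroups, h, ih]
    · have hstep : pvStepA (res, pvPartial pend) byte =
          (res ++ [pvDecodeGroup (pend ++ [byte])], pvPartial []) := by
        simp [pvStepA, h, pvDecodeGroup_eq, pvPartial]
        
      simp [List.foldl_cons, hstep, pvGroups, h, ih]

-- ===== VERDICT (by name: the statement is the Claim_ definition above) =====
theorem one_is_more_decode_spec : Claim_equal_one_is_more_decode := by
  intro encoded _
  have h := pv_inv encoded [] []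
  simpa [one_is_more_decode, one_is_more_decode_alt, pvPartial, Spec_one_is_more_decode] using h
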